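-- pv_equiv track=rewrite | github.com/gss10282023/new38888 | backend/core/file_scanner.py | _is_mime_allowed
-- ===== SOURCE A (Python) =====
-- from typing import Iterable
--
-- def _is_mime_allowed(mime: str, allowed: Iterable[str]) -> bool:
--     for pattern in allowed:
--         if pattern.endswith("/*"):
--             prefix = pattern[:-2]
--             if mime.startswith(prefix):
--                 return True
--         elif mime == pattern:
--             return True
--     return False
-- ===== SOURCE B (Python) =====
-- def _is_mime_allowed(mime, allowed):
--     # Inverted quantification: instead of scanning patterns, enumerate the patterns
--     # that could match this mime (the mime itself, and mime[:i] + "/*" for each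
--     # prefix length i that occurs among the wildcard patterns) and look them up
--     # in a set built from `allowed`.
--     allowed_set = set(allowed)
--     if mime in allowed_set:
--         return True
--     prefix_lens = {len(p) - 2 for p in allowed_set if p.endswith("/*")}
--     return any(i <= len(mime) and mime[:i] + "/*" in allowed_set
--                for i in prefix_lens)
-- ===== Notes on version B (the rewrite author's own statement) =====
-- stated objective: alternative
-- what changed: Inverts the quantification: instead of A's scan over patterns with a per-pattern wildcard/exact branch, B builds a set from allowed once, then enumerates the candidate patterns that could match the mime (the mime itself plus mime[:i]+"/*" for each prefix length i occurring among the wildcard patterns) and looks them up in that set.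
import Mathlib
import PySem

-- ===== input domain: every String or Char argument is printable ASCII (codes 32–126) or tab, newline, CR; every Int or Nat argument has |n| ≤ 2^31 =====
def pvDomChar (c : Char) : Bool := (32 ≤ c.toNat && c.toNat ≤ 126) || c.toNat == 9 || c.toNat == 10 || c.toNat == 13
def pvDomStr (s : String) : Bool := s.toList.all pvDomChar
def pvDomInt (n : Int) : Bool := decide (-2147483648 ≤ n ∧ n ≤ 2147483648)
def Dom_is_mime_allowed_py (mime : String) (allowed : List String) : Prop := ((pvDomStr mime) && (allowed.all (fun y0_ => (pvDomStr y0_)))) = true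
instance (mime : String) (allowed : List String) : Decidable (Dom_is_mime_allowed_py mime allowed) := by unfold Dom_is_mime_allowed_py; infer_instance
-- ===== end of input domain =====

-- B inverts the quantification: instead of scanning patterns with a per-pattern branch like A,
-- it builds a set from `allowed` and looks up the candidate patterns that could match the mime
-- (the mime itself, and mime[:i] + "/*" for each wildcard prefix length i present);
-- alternative algorithm of similar cost, no speed claim.


-- ===== PORT A =====
-- literal port of A: one loop over the patterns, per pattern a branch on endswith "/*" / equality, early return
def is_mime_allowed_py (mime : String) (allowed : List String) : Bool :=
  match allowed with
  | [] => false
  | pattern :: rest =>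
    if PySem.Str.endswith pattern "/*" then
      let prefx := PySem.Str.slice pattern none (some (-2))
      if PySem.Str.startswith mime prefx then true
      else is_mime_allowed_py mime rest
    else if mime == pattern then true
    else is_mime_allowed_py mime rest

-- ===== PORT B =====
-- the candidate pattern mime[:i] + "/*"
def pvCand (mime : String) (i : Int) : String :=
  String.ofList ((PySem.Str.slice mime none (some i)).toList ++ ['/', '*'])

-- port of B: build set(allowed); check mime itself; then for each prefix length occurring
-- among the wildcard patterns, look the candidate mime[:i] + "/*" up in the set
def is_mime_allowed_py_alt (mime : String) (allowed : List String) : Bool :=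
  let allowedSet := PySem.Set.ofList allowed
  if PySem.Set.contains allowedSet mime then true
  else
    let prefixLens := PySem.Set.ofList
      ((allowedSet.filter (fun p => PySem.Str.endswith p "/*")).map
        (fun p => PySem.Str.len p - 2))
    prefixLens.any (fun i =>
      decide (i ≤ PySem.Str.len mime) && PySem.Set.contains allowedSet (pvCand mime i))

-- ===== PRECONDITION & SPEC =====
def Spec_is_mime_allowed_py (mime : String) (allowed : List String) (out : Bool) : Prop := out = is_mime_allowed_py_alt mime allowed
instance (mime : String) (allowed : List String) (out : Bool) : Decidable (Spec_is_mime_allowed_py mime allowed out) := by unfold Spec_is_mime_allowed_py; infer_instance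

-- ===== CLAIM (what is proved, stated in full; the proofs are below) =====
def Claim_equal_is_mime_allowed_py : Prop := ∀ (mime : String) (allowed : List String), Dom_is_mime_allowed_py mime allowed → Spec_is_mime_allowed_py mime allowed (is_mime_allowed_py mime allowed)

-- ===== LEMMAS AND PROOFS =====

-- A's per-pattern test, factored out for the proof
def pvMatchA (mime pattern : String) : Bool :=
  if PySem.Str.endswith pattern "/*" then
    PySem.Str.startswith mime (PySem.Str.slice pattern none (some (-2)))
  else mime == pattern

theorem pv_A_eq_any (mime : String) (allowed : List String) :
    is_mime_allowed_py mime allowed = allowed.any (pvMatchA mime) := by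
  induction allowed with
  | nil => simp [is_mime_allowed_py]
  | cons pattern rest ih =>
    simp only [is_mime_allowed_py, List.any_cons, ← ih, pvMatchA]
    split_ifs <;> simp_all

-- the candidate's character list, under 0 ≤ i
theorem pv_cand_toList (mime : String) (i : Int) (h0 : 0 ≤ i) :
    (pvCand mime i).toList = mime.toList.take i.toNat ++ ['/', '*'] := by
  unfold pvCand
  rw [String.toList_ofList, PySem.Str.toList_slice, PySem.Chars.slice_eq_listSlice,
    PySem.List.slice_to mime.toList h0]

-- the candidate matches A's test whenever 0 ≤ i ≤ len(mime)
theorem pv_cand_matches (mime : String) (i : Int) (h0 : 0 ≤ i)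
    (hle : i ≤ (mime.toList.length : Int)) :
    pvMatchA mime (pvCand mime i) = true := by
  unfold pvMatchA
  have hts := pv_cand_toList mime i h0
  have hend : PySem.Str.endswith (pvCand mime i) "/*" = true := by
    rw [PySem.Str.endswith_eq, PySem.Chars.endswith_iff, hts]
    exact ⟨_, rfl⟩
  rw [if_pos hend, PySem.Str.startswith_eq, PySem.Chars.startswith_iff,
    PySem.Str.toList_slice, PySem.Chars.slice_eq_listSlice,
    PySem.List.slice_to_neg_ofNat _ 2 (by omega), hts]
  have hlen : (mime.toList.take i.toNat).length = i.toNat := by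
    rw [List.length_take]; omega
  rw [List.length_append, hlen]
  simp only [List.length_cons, List.length_nil]
  have : i.toNat + (0 + 1 + 1) - 2 = i.toNat := by omega
  rw [this, List.take_append_of_le_length (by omega), List.take_take, min_self]
  exact List.take_prefix _ _

-- a wildcard pattern that A accepts IS the candidate at its own prefix length
theorem pv_wild_eq_cand (mime p : String)
    (hend : PySem.Str.endswith p "/*" = true)
    (hsw : PySem.Str.startswith mime (PySem.Str.slice p none (some (-2))) = true) :
    2 ≤ p.toList.length ∧ ((p.toList.length : Int) - 2) ≤ (mime.toList.length : Int) ∧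
      pvCand mime ((p.toList.length : Int) - 2) = p := by
  rw [PySem.Str.endswith_eq, PySem.Chars.endswith_iff] at hend
  obtain ⟨t, ht⟩ := hend
  have hsl : ("/*".toList) = ['/', '*'] := rfl
  rw [hsl] at ht
  have hlenp : p.toList.length = t.length + 2 := by
    rw [← ht, List.length_append]; rfl
  rw [PySem.Str.startswith_eq, PySem.Chars.startswith_iff, PySem.Str.toList_slice,
    PySem.Chars.slice_eq_listSlice, PySem.List.slice_to_neg_ofNat _ 2 (by omega)] at hsw
  have htake : p.toList.take (p.toList.length - 2) = t := by
    rw [← ht]; simp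
  rw [htake] at hsw
  have hlt : t.length ≤ mime.toList.length := hsw.length_le
  refine ⟨by omega, by omega, ?_⟩
  apply String.toList_injective
  rw [pv_cand_toList mime _ (by omega)]
  have hnat : ((p.toList.length : Int) - 2).toNat = t.length := by omega
  rw [hnat, ← List.prefix_iff_eq_take.mp hsw, ht]

-- mime itself passes A's test
theorem pv_self_matches (mime : String) : pvMatchA mime mime = true := by
  unfold pvMatchA
  by_cases h : PySem.Str.endswith mime "/*" = true
  · rw [if_pos h]
    rw [PySem.Str.startswith_eq, PySem.Chars.startswith_iff, PySem.Str.toList_slice,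
      PySem.Chars.slice_eq_listSlice, PySem.List.slice_to_neg_ofNat mime.toList 2 (by omega)]
    exact List.take_prefix _ _
  · rw [if_neg h]; simp

-- a wildcard pattern has at least the two characters "/*"
theorem pv_wild_len (q : String) (h : PySem.Str.endswith q "/*" = true) :
    2 ≤ q.toList.length := by
  rw [PySem.Str.endswith_eq, PySem.Chars.endswith_iff] at h
  obtain ⟨t, ht⟩ := h
  have : q.toList.length = t.length + 2 := by rw [← ht, List.length_append]; rfl
  omega

-- ===== VERDICT (by name: the statement is the Claim_ definition above) =====
theorem is_mime_allowed_py_spec : Claim_equal_is_mime_allowed_py := by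
  intro mime allowed _
  unfold Spec_is_mime_allowed_py is_mime_allowed_py_alt
  rw [pv_A_eq_any]
  by_cases hm : PySem.Set.contains (PySem.Set.ofList allowed) mime = true
  · simp only [hm, if_true]
    have : mime ∈ allowed := (PySem.Set.mem_ofList allowed mime).mp
      ((PySem.Set.contains_iff _ mime).mp hm)
    exact List.any_eq_true.mpr ⟨mime, this, pv_self_matches mime⟩
  · rw [Bool.not_eq_true] at hm
    simp only [hm, Bool.false_eq_true, if_false]
    rw [Bool.eq_iff_iff, List.any_eq_true, List.any_eq_true]
    constructor
    · rintro ⟨p, hp, hmp⟩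
      unfold pvMatchA at hmp
      by_cases hend : PySem.Str.endswith p "/*" = true
      · rw [if_pos hend] at hmp
        obtain ⟨h2, hle, hcand⟩ := pv_wild_eq_cand mime p hend hmp
        refine ⟨(p.toList.length : Int) - 2, ?_, ?_⟩
        · rw [PySem.Set.mem_ofList, List.mem_map]
          exact ⟨p, List.mem_filter.mpr ⟨(PySem.Set.mem_ofList allowed p).mpr hp, hend⟩,
            by rw [PySem.Str.len_eq]⟩
        · rw [Bool.and_eq_true, decide_eq_true_iff, PySem.Str.len_eq]
          refine ⟨hle, (PySem.Set.contains_iff (PySem.Set.ofList allowed)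
            (pvCand mime ((p.toList.length : Int) - 2))).mpr ?_⟩
          rw [PySem.Set.mem_ofList, hcand]
          exact hp
      · rw [if_neg hend] at hmp
        refine absurd ((PySem.Set.contains_iff (PySem.Set.ofList allowed) mime).mpr ?_)
          (by rw [hm]; simp)
        rw [PySem.Set.mem_ofList, eq_of_beq hmp]
        exact hp
    · rintro ⟨i, hi, hbody⟩
      rw [Bool.and_eq_true, decide_eq_true_iff, PySem.Str.len_eq] at hbody
      obtain ⟨hile, hcont⟩ := hbody
      rw [PySem.Set.mem_ofList, List.mem_map] at hi
      obtain ⟨q, hq, hiq⟩ := hi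
      have hq2 : 2 ≤ q.toList.length := pv_wild_len q (List.mem_filter.mp hq).2
      have hi0 : 0 ≤ i := by rw [← hiq, PySem.Str.len_eq]; omega
      refine ⟨pvCand mime i, (PySem.Set.mem_ofList allowed _).mp
        ((PySem.Set.contains_iff _ _).mp hcont), pv_cand_matches mime i hi0 hile⟩
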